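-- pv_equiv track=rewrite | github.com/dharmen001/Python-sql-screening | excerciseTwo.py | find_employees
-- ===== SOURCE A (Python) =====
-- def find_all_reporting_employees(manager, manager_to_employee_mappings, results):
--     if manager in results:
--         # return the already computed mapping
--         return results.get(manager)
--
--     manager_employees = manager_to_employee_mappings.get(manager)
--
--     for reporting in manager_employees.copy():
--         # find all employees reporting to the current employee
--         employees = find_all_reporting_employees(reporting, manager_to_employee_mappings, results)
--
--         # move those employees to the current manager
--         if employees:
--             manager_employees.update(employees)
--
--     # save the result to avoid re computation and return it
--     results[manager] = manager_employees
--     return manager_employees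
--
-- def find_employees(employee_to_manager_mappings):
--     # store manager to employee mappings in a new dictionary
--     manager_to_employee_mappings = {}
--
--     # fill the above dictionary with the manager to employee mappings
--     for employee, manager in employee_to_manager_mappings.items():
--         manager_to_employee_mappings.setdefault(employee, set())
--         # don't map an employee with itself
--         if employee != manager:
--             manager_to_employee_mappings.setdefault(manager, set()).add(employee)
--
--     # construct an empty dictionary to store the result
--     result = {}
--
--     # find all reporting employees (direct and indirect) for every manager
--     # and store the result in a dictionary
--     for key in employee_to_manager_mappings.keys():
--         find_all_reporting_employees(key, manager_to_employee_mappings, result)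
--
--     return result
-- ===== SOURCE B (Python) =====
-- def find_employees(employee_to_manager_mappings):
--     # Iterative version: group direct reports per manager once (plain lists),
--     # then compute every closure with an explicit stack of (node, child-index)
--     # frames instead of recursion; a node's set is assembled when its frame is
--     # exhausted (post-order), from the already-finished sets of its reports.
--     direct = {}
--     for employee, manager in employee_to_manager_mappings.items():
--         direct.setdefault(employee, [])
--         if employee != manager:
--             direct.setdefault(manager, []).append(employee)
--
--     result = {}
--     for key in employee_to_manager_mappings:
--         if key in result:
--             continue
--         stack = [(key, 0)]
--         while stack:
--             node, i = stack.pop()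
--             kids = direct[node]
--             if i < len(kids):
--                 stack.append((node, i + 1))
--                 child = kids[i]
--                 if child not in result:
--                     stack.append((child, 0))
--             else:
--                 team = set(kids)
--                 for child in kids:
--                     team |= result[child]
--                 result[node] = team
--     return result
-- ===== Notes on version B (the rewrite author's own statement) =====
-- stated objective: alternative
-- what changed: Replaces A's memoized recursive DFS that merges sets in place into a shared manager-to-set dictionary with a non-recursive traversal: direct reports are grouped once into plain lists, and each closure is computed by an explicit stack of (node, child-index) frames, a node's set being assembled in post-order from its reports' already-finished sets.
import Mathlib
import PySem

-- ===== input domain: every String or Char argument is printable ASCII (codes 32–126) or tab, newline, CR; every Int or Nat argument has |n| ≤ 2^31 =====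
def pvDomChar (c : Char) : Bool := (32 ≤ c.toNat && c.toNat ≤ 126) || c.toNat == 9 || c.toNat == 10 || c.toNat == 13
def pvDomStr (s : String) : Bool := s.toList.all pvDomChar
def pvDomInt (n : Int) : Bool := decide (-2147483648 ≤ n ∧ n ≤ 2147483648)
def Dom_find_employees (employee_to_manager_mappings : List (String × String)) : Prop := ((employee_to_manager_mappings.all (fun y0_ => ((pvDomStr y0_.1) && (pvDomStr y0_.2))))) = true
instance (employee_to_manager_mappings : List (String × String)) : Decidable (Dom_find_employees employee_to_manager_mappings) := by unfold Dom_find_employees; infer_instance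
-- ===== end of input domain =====

-- B replaces A's memoized recursive DFS (which merges sets in place into a shared
-- manager→set dictionary) with a non-recursive traversal: an explicit stack of
-- (node, child-index) frames over per-manager lists of direct reports, each node's set
-- assembled post-order from its reports' finished sets (objective: alternative; not faster).
-- Return-value equivalence only: A mutates no argument, and Python's hash iteration order
-- over sets (unmodelled) only affects the order of the returned dict's keys, which the dict
-- convention compares ignoring order; both ports use insertion order.

-- ===== PORT A =====
-- the parameter is a Python dict, handed over as an association list: rebuild it (last value per
-- key wins, first-occurrence position); shared by both ports as part of the type convention
def pvDict (l : List (String × String)) : PySem.Dict String String :=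
  l.foldl (fun d em => d.insert em.1 em.2) PySem.Dict.empty

-- first loop of A: manager → set of direct reports (setdefault/add, literally)
def pvBuild (d : PySem.Dict String String) : PySem.Dict String (PySem.Set String) :=
  d.items.foldl (fun m em =>
    let m1 := m.setdefault em.1 PySem.Set.empty
    if em.1 ≠ em.2 then
      (m1.setdefault em.2 PySem.Set.empty).modify em.2 PySem.Set.empty
        (fun s => PySem.Set.add s em.1)
    else m1) PySem.Dict.empty

-- find_all_reporting_employees, state (return value, manager_to_employee_mappings, results);
-- the fuel only makes the recursion total (A recurses forever exactly on the cyclic inputs,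
-- which Pre_ excludes)
def pvGoA (fuel : Nat) (manager : String)
    (m2e results : PySem.Dict String (PySem.Set String)) :
    PySem.Set String × PySem.Dict String (PySem.Set String) × PySem.Dict String (PySem.Set String) :=
  match fuel with
  | 0 => (PySem.Set.empty, m2e, results)
  | fuel + 1 =>
    match results.get? manager with
    | some s => (s, m2e, results)
    | none =>
      let me := m2e.getD manager PySem.Set.empty
      let st := me.foldl (fun st reporting =>
        let r := pvGoA fuel reporting st.1 st.2
        if r.1 ≠ PySem.Set.empty then
          (r.2.1.modify manager PySem.Set.empty (fun s => PySem.Set.update s r.1), r.2.2)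
        else (r.2.1, r.2.2)) (m2e, results)
      let finalSet := st.1.getD manager PySem.Set.empty
      (finalSet, st.1, st.2.insert manager finalSet)

def find_employees (employee_to_manager_mappings : List (String × String)) :
    List (String × List String) :=
  let d := pvDict employee_to_manager_mappings
  let m2e := pvBuild d
  let st := d.keys.foldl
    (fun st k => ((pvGoA (employee_to_manager_mappings.length + 1) k st.1 st.2).2.1,
                  (pvGoA (employee_to_manager_mappings.length + 1) k st.1 st.2).2.2))
    (m2e, PySem.Dict.empty)
  st.2.items

-- ===== PORT B =====
-- first loop of B: group the direct reports per manager, as plain lists (setdefault/append)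
def pvBuildB (d : PySem.Dict String String) : PySem.Dict String (List String) :=
  d.items.foldl (fun m em =>
    let m1 := m.setdefault em.1 ([] : List String)
    if em.1 ≠ em.2 then
      (m1.setdefault em.2 []).modify em.2 [] (fun rs => rs ++ [em.1])
    else m1) PySem.Dict.empty

-- one turn of B's while loop (pop a frame, descend or emit); the empty stack is a fixpoint.
-- direct[node] and result[child] are ported with getD: every pushed node is an employee key
-- (present in direct by the setdefault), and each child's set is finished before its parent's
-- frame is exhausted, so neither lookup can raise on the inputs Pre_ admits (exact there)
def pvStep1 (direct : PySem.Dict String (List String))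
    (st : List (String × Nat) × PySem.Dict String (PySem.Set String)) :
    List (String × Nat) × PySem.Dict String (PySem.Set String) :=
  match st with
  | ([], result) => ([], result)
  | ((node, i) :: stack, result) =>
    let kids := direct.getD node []
    if i < kids.length then
      let child := kids.getD i ""
      match result.get? child with
      | none => ((child, 0) :: (node, i + 1) :: stack, result)
      | some _ => ((node, i + 1) :: stack, result)
    else
      let team := kids.foldl (fun t c => PySem.Set.update t (result.getD c PySem.Set.empty))
        (PySem.Set.ofList kids)
      (stack, result.insert node team)

-- the while loop, bounded by fuel; the fuel only makes the loop total (B's Python loops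
-- forever exactly on the cyclic inputs, which Pre_ excludes; pvFuel is proved sufficient
-- on every input Pre_ admits)
def pvStackRun (direct : PySem.Dict String (List String)) (fuel : Nat)
    (st : List (String × Nat) × PySem.Dict String (PySem.Set String)) :
    PySem.Dict String (PySem.Set String) :=
  ((pvStep1 direct)^[fuel] st).2

def pvCost (L : Nat) : Nat → Nat
  | 0 => 0
  | d + 1 => (L + 1) + L * pvCost L d

def pvFuel (l : List (String × String)) : Nat :=
  pvCost (pvDict l).items.length (l.length + 1)

def find_employees_alt (employee_to_manager_mappings : List (String × String)) :
    List (String × List String) :=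
  let d := pvDict employee_to_manager_mappings
  let direct := pvBuildB d
  (d.keys.foldl (fun result key =>
      match result.get? key with
      | some _ => result           -- if key in result: continue
      | none => pvStackRun direct (pvFuel employee_to_manager_mappings) ([(key, 0)], result))
    PySem.Dict.empty).items

-- ===== PRECONDITION & SPEC =====
-- one step up the manager chain: employee ↦ its manager, stalling (none) on a missing key or a
-- self-managed employee
def pvStep (d : PySem.Dict String String) : Option String → Option String
  | none => none
  | some k =>
    match d.get? k with
    | some m => if m ≠ k then some m else none
    | none => none

-- Pre_ excludes exactly the inputs whose manager chain contains a cycle: there Python A's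
-- recursion never returns (RecursionError); every chain of an acyclic mapping stalls within
-- length+1 steps, so Pre_ is exactly A's return domain.
def Pre_find_employees (employee_to_manager_mappings : List (String × String)) : Prop :=
  ∀ k ∈ (pvDict employee_to_manager_mappings).keys,
    (pvStep (pvDict employee_to_manager_mappings))^[employee_to_manager_mappings.length + 1]
      (some k) = none

instance (employee_to_manager_mappings : List (String × String)) :
    Decidable (Pre_find_employees employee_to_manager_mappings) := by
  unfold Pre_find_employees; infer_instance

def pvWitness_find_employees : (List (String × String)) :=
  [("alice", "bob"), ("bob", "carol")]

def Spec_find_employees (employee_to_manager_mappings : List (String × String))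
    (out : List (String × List String)) : Prop :=
  out = find_employees_alt employee_to_manager_mappings

instance (employee_to_manager_mappings : List (String × String))
    (out : List (String × List String)) :
    Decidable (Spec_find_employees employee_to_manager_mappings out) := by
  unfold Spec_find_employees; infer_instance

-- ===== CLAIM (what is proved, stated in full; the proofs are below) =====
def Claim_equal_find_employees : Prop :=
  ∀ (employee_to_manager_mappings : List (String × String)),
    Dom_find_employees employee_to_manager_mappings →
    Pre_find_employees employee_to_manager_mappings →
    Spec_find_employees employee_to_manager_mappings
      (find_employees employee_to_manager_mappings)

-- ===== LEMMAS AND PROOFS =====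

-- direct reports of a boss, in input order (proof-side only)
def pvDirect (pairs : List (String × String)) (boss : String) : List String :=
  (pairs.filter (fun em => em.2 == boss && em.1 != em.2)).map (·.1)

def pvG (l : List (String × String)) : String → List String :=
  fun b => pvDirect (pvDict l).items b

-- the intermediate pure memoized recursion both ports are compared with: closure(boss)
-- with the result memo threaded
def pvClosure (g : String → List String) :
    Nat → String → PySem.Dict String (PySem.Set String) →
    PySem.Set String × PySem.Dict String (PySem.Set String)
  | 0, _, result => (PySem.Set.empty, result)
  | fuel + 1, boss, result =>
    match result.get? boss with
    | some s => (s, result)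
    | none =>
      let st := (g boss).foldl (fun st member =>
          let r := pvClosure g fuel member st.2
          (PySem.Set.update st.1 r.1, r.2))
        (PySem.Set.ofList (g boss), result)
      (st.1, st.2.insert boss st.1)

lemma pv_nodup_keys (l : List (String × String)) : (pvDict l).keys.Nodup :=
  PySem.Dict.nodup_keys_foldl_insert_key l Prod.fst (fun _ x => x.2) PySem.Dict.empty PySem.Dict.nodup_keys_empty

lemma pv_direct_nodup (l : List (String × String)) (b : String) :
    (pvDirect (pvDict l).items b).Nodup := by
  have h := pv_nodup_keys l
  have : (pvDict l).keys = (pvDict l).items.map Prod.fst := by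
    simp only [PySem.Dict.keys]
  rw [this] at h
  exact h.sublist (List.Sublist.map _ List.filter_sublist)

lemma pv_sd_getD (d : PySem.Dict String (PySem.Set String)) (k b : String) :
    (d.setdefault k PySem.Set.empty).getD b PySem.Set.empty = d.getD b PySem.Set.empty := by
  by_cases hb : b = k
  · subst hb; exact PySem.Dict.getD_setdefault_self d b PySem.Set.empty PySem.Set.empty
  · rw [PySem.Dict.getD_eq_get?_getD, PySem.Dict.get?_setdefault_of_ne d PySem.Set.empty hb,
      ← PySem.Dict.getD_eq_get?_getD]

-- the direct-report set A keeps for b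
def pvDS (l : List (String × String)) (b : String) : PySem.Set String :=
  PySem.Set.ofList (pvDirect (pvDict l).items b)

lemma pv_DS_eq (l : List (String × String)) (b : String) :
    pvDS l b = pvDirect (pvDict l).items b :=
  PySem.Set.ofList_eq_self_of_nodup _ (pv_direct_nodup l b)

-- A's first loop computes exactly the direct-report sets
lemma pv_build_fold (it : List (String × String)) (m : PySem.Dict String (PySem.Set String)) (b : String) :
    (it.foldl (fun m em =>
      let m1 := m.setdefault em.1 PySem.Set.empty
      if em.1 ≠ em.2 then
        (m1.setdefault em.2 PySem.Set.empty).modify em.2 PySem.Set.empty (fun s => PySem.Set.add s em.1)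
      else m1) m).getD b PySem.Set.empty
    = PySem.Set.update (m.getD b PySem.Set.empty) (pvDirect it b) := by
  induction it generalizing m with
  | nil => simp [pvDirect, PySem.Set.update]
  | cons em rest ih =>
    rw [List.foldl_cons, ih]
    by_cases h1 : em.1 = em.2
    · simp only [h1, ne_eq, not_true_eq_false, if_false]
      have : pvDirect (em :: rest) b = pvDirect rest b := by
        simp [pvDirect, h1]
      rw [this, pv_sd_getD]
    · simp only [if_pos h1]
      by_cases h2 : em.2 = b
      · have h1b : ¬ em.1 = b := h2 ▸ h1
        have hd : pvDirect (em :: rest) b = em.1 :: pvDirect rest b := by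
          simp [pvDirect, h2, h1b]
        rw [hd]
        have : PySem.Set.update (m.getD b PySem.Set.empty) (em.1 :: pvDirect rest b)
            = PySem.Set.update (PySem.Set.add (m.getD b PySem.Set.empty) em.1) (pvDirect rest b) := by
          simp [PySem.Set.update]
        rw [this]
        congr 1
        subst h2
        rw [PySem.Dict.getD_modify_self, pv_sd_getD, pv_sd_getD]
      · have hd : pvDirect (em :: rest) b = pvDirect rest b := by
          simp [pvDirect, h2]
        rw [hd]
        congr 1
        rw [PySem.Dict.getD_modify_of_ne _ PySem.Set.empty _ (fun he => h2 he.symm), pv_sd_getD, pv_sd_getD]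

lemma pv_build_getD (l : List (String × String)) (b : String) :
    (pvBuild (pvDict l)).getD b PySem.Set.empty = pvDS l b := by
  unfold pvBuild pvDS
  rw [pv_build_fold]
  rw [PySem.Dict.getD_empty]
  rfl

-- B's grouping loop computes exactly the direct-report lists
lemma pv_sdL_getD (d : PySem.Dict String (List String)) (k b : String) :
    (d.setdefault k ([] : List String)).getD b [] = d.getD b [] := by
  by_cases hb : b = k
  · subst hb; exact PySem.Dict.getD_setdefault_self d b [] []
  · rw [PySem.Dict.getD_eq_get?_getD, PySem.Dict.get?_setdefault_of_ne d [] hb,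
      ← PySem.Dict.getD_eq_get?_getD]

lemma pv_buildB_fold (it : List (String × String)) (m : PySem.Dict String (List String))
    (b : String) :
    (it.foldl (fun m em =>
      let m1 := m.setdefault em.1 ([] : List String)
      if em.1 ≠ em.2 then
        (m1.setdefault em.2 []).modify em.2 [] (fun rs => rs ++ [em.1])
      else m1) m).getD b []
    = m.getD b [] ++ pvDirect it b := by
  induction it generalizing m with
  | nil => simp [pvDirect]
  | cons em rest ih =>
    rw [List.foldl_cons, ih]
    by_cases h1 : em.1 = em.2
    · simp only [h1, ne_eq, not_true_eq_false, if_false]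
      have : pvDirect (em :: rest) b = pvDirect rest b := by
        simp [pvDirect, h1]
      rw [this, pv_sdL_getD]
    · simp only [if_pos h1]
      by_cases h2 : em.2 = b
      · have h1b : ¬ em.1 = b := h2 ▸ h1
        have hd : pvDirect (em :: rest) b = em.1 :: pvDirect rest b := by
          simp [pvDirect, h2, h1b]
        rw [hd]
        subst h2
        rw [PySem.Dict.getD_modify_self, pv_sdL_getD, pv_sdL_getD]
        simp
      · have hd : pvDirect (em :: rest) b = pvDirect rest b := by
          simp [pvDirect, h2]
        rw [hd]
        rw [PySem.Dict.getD_modify_of_ne _ [] _ (fun he => h2 he.symm), pv_sdL_getD, pv_sdL_getD]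

lemma pv_buildB_getD (l : List (String × String)) (b : String) :
    (pvBuildB (pvDict l)).getD b [] = pvG l b := by
  unfold pvBuildB pvG
  rw [pv_buildB_fold, PySem.Dict.getD_empty]
  rfl

-- the direct-report edge relation and its reflexive-transitive reach (proof-side only)
def pvEdge (l : List (String × String)) (b c : String) : Prop :=
  c ∈ pvG l b

def pvReach (l : List (String × String)) : String → String → Prop :=
  Relation.ReflTransGen (pvEdge l)

def pvAcyc (l : List (String × String)) : Prop :=
  ∀ b c, pvEdge l b c → ¬ pvReach l c b

lemma pv_edge_step (l : List (String × String)) (b c : String) (h : pvEdge l b c) :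
    pvStep (pvDict l) (some c) = some b := by
  unfold pvEdge pvG pvDirect at h
  simp only [List.mem_map, List.mem_filter, Bool.and_eq_true, beq_iff_eq, bne_iff_ne] at h
  obtain ⟨em, ⟨hmem, hmgr, hne⟩, hfst⟩ := h
  have hget : (pvDict l).get? c = some b := by
    have := PySem.Dict.get?_of_mem_items (d := pvDict l) (k := em.1) (v := em.2) hmem
      (pv_nodup_keys l)
    rw [hfst, hmgr] at this
    exact this
  have hcb : b ≠ c := by rw [← hfst, ← hmgr]; exact fun he => hne he.symm
  simp [pvStep, hget, hcb]

lemma pv_edge_mem_keys (l : List (String × String)) (b c : String) (h : pvEdge l b c) :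
    c ∈ (pvDict l).keys := by
  unfold pvEdge pvG pvDirect at h
  simp only [List.mem_map, List.mem_filter] at h
  obtain ⟨em, ⟨hmem, _⟩, hfst⟩ := h
  simp only [PySem.Dict.keys, List.mem_map]
  exact ⟨em, hmem, hfst⟩

lemma pv_step_none (d : PySem.Dict String String) (j : Nat) : (pvStep d)^[j] none = none :=
  Function.iterate_fixed rfl j

lemma pv_reach_iterate (l : List (String × String)) (c b : String) (h : pvReach l c b) :
    ∃ j, (pvStep (pvDict l))^[j] (some b) = some c := by
  induction h with
  | refl => exact ⟨0, rfl⟩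
  | tail _ hedge ih =>
    obtain ⟨j, hj⟩ := ih
    exact ⟨j + 1, by
      rw [Function.iterate_add_apply (pvStep (pvDict l)) j 1 _]
      simpa [pv_edge_step l _ _ hedge] ⟩

-- an acyclic manager chain means no node reaches itself along direct-report edges
lemma pv_pre_acyc (l : List (String × String)) (h : Pre_find_employees l) : pvAcyc l := by
  intro b c hedge hreach
  obtain ⟨j, hj⟩ := pv_reach_iterate l c b hreach
  have hcyc : (pvStep (pvDict l))^[1 + j] (some b) = some b := by
    rw [Function.iterate_add_apply (pvStep (pvDict l)) 1 j, hj]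
    simpa using pv_edge_step l b c hedge
  have hb1 : pvStep (pvDict l) (some b) ≠ none := by
    intro hnone
    rw [(by omega : 1 + j = j + 1), Function.iterate_add_apply (pvStep (pvDict l)) j 1] at hcyc
    simp only [Function.iterate_one, hnone, pv_step_none] at hcyc
    simp at hcyc
  have hbkeys : b ∈ (pvDict l).keys := by
    by_contra hnb
    have : (pvDict l).get? b = none := (PySem.Dict.get?_eq_none_iff_not_mem_keys _ b).2 hnb
    exact hb1 (by simp [pvStep, this])
  have hrep : ∀ i : Nat, (pvStep (pvDict l))^[i * (1 + j)] (some b) = some b := by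
    intro i
    induction i with
    | zero => simp
    | succ i ih =>
      rw [Nat.succ_mul, Function.iterate_add_apply, hcyc, ih]
  have hL := h b hbkeys
  set L := l.length + 1 with hLdef
  have hge : L ≤ L * (1 + j) := Nat.le_mul_of_pos_right L (by omega)
  have : (pvStep (pvDict l))^[L * (1 + j)] (some b) = none := by
    rw [(by omega : L * (1 + j) = (L * (1 + j) - L) + L),
      Function.iterate_add_apply, hL, pv_step_none]
  rw [hrep L] at this
  simp at this

-- depth bound along direct-report edges: pvDB l d n = every edge-chain from n has < d edges
def pvDB (l : List (String × String)) : Nat → String → Prop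
  | 0, _ => False
  | d + 1, n => ∀ c ∈ pvG l n, pvDB l d c

lemma pv_not_dB_chain (l : List (String × String)) :
    ∀ d n, ¬ pvDB l (d + 1) n →
      ∃ c ∈ (pvDict l).keys, (pvStep (pvDict l))^[d + 1] (some c) = some n := by
  intro d
  induction d with
  | zero =>
    intro n h
    simp only [pvDB] at h
    push_neg at h
    obtain ⟨c, hc, _⟩ := h
    exact ⟨c, pv_edge_mem_keys l n c hc, by simpa using pv_edge_step l n c hc⟩
  | succ d ih =>
    intro n h
    have h2 : ∃ c ∈ pvG l n, ¬ pvDB l (d + 1) c := by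
      by_contra hno
      push_neg at hno
      exact h hno
    obtain ⟨c, hc, hnc⟩ := h2
    obtain ⟨e, he, hstep⟩ := ih c hnc
    refine ⟨e, he, ?_⟩
    rw [Function.iterate_succ_apply' (pvStep (pvDict l)) (d + 1), hstep]
    exact pv_edge_step l n c hc

lemma pv_pre_dB (l : List (String × String)) (hpre : Pre_find_employees l) :
    ∀ n, pvDB l (l.length + 1) n := by
  intro n
  by_contra h
  obtain ⟨c, hc, hstep⟩ := pv_not_dB_chain l l.length n h
  rw [hpre c hc] at hstep
  cases hstep

-- the two loop bodies of A's recursion resp. the pure recursion, named for the fold lemmas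
def pvFA (f : Nat) (n : String)
    (st : PySem.Dict String (PySem.Set String) × PySem.Dict String (PySem.Set String))
    (reporting : String) :
    PySem.Dict String (PySem.Set String) × PySem.Dict String (PySem.Set String) :=
  let r := pvGoA f reporting st.1 st.2
  if r.1 ≠ PySem.Set.empty then
    (r.2.1.modify n PySem.Set.empty (fun s => PySem.Set.update s r.1), r.2.2)
  else (r.2.1, r.2.2)

def pvFB (g : String → List String) (f : Nat)
    (st : PySem.Set String × PySem.Dict String (PySem.Set String)) (member : String) :
    PySem.Set String × PySem.Dict String (PySem.Set String) :=
  let r := pvClosure g f member st.2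
  (PySem.Set.update st.1 r.1, r.2)

lemma pvGoA_hit (f : Nat) (n : String) (m2e res : PySem.Dict String (PySem.Set String))
    (s : PySem.Set String) (h : res.get? n = some s) :
    pvGoA (f + 1) n m2e res = (s, m2e, res) := by
  simp [pvGoA, h]

lemma pvGoA_miss (f : Nat) (n : String) (m2e res : PySem.Dict String (PySem.Set String))
    (h : res.get? n = none) :
    pvGoA (f + 1) n m2e res =
      (((m2e.getD n PySem.Set.empty).foldl (pvFA f n) (m2e, res)).1.getD n PySem.Set.empty,
       ((m2e.getD n PySem.Set.empty).foldl (pvFA f n) (m2e, res)).1,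
       ((m2e.getD n PySem.Set.empty).foldl (pvFA f n) (m2e, res)).2.insert n
         (((m2e.getD n PySem.Set.empty).foldl (pvFA f n) (m2e, res)).1.getD n PySem.Set.empty)) := by
  unfold pvGoA; rw [h]; rfl

lemma pvClosure_hit (g : String → List String) (f : Nat) (n : String)
    (res : PySem.Dict String (PySem.Set String)) (s : PySem.Set String)
    (h : res.get? n = some s) : pvClosure g (f + 1) n res = (s, res) := by
  simp [pvClosure, h]

lemma pvClosure_miss (g : String → List String) (f : Nat) (n : String)
    (res : PySem.Dict String (PySem.Set String)) (h : res.get? n = none) :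
    pvClosure g (f + 1) n res =
      (((g n).foldl (pvFB g f) (PySem.Set.ofList (g n), res)).1,
       ((g n).foldl (pvFB g f) (PySem.Set.ofList (g n), res)).2.insert n
         ((g n).foldl (pvFB g f) (PySem.Set.ofList (g n), res)).1) := by
  unfold pvClosure; rw [h]; rfl

-- the simulation invariant: while every uncomputed entry of m2e reachable from the current
-- node still holds its direct reports, A's mutating recursion and the pure recursion agree
-- (same value, same memo — including on fuel exhaustion, which both hit identically)
def pvMain (l : List (String × String)) (f : Nat) : Prop :=
  ∀ n m2e res,
    (∀ k, res.get? k = none → pvReach l n k →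
      m2e.getD k PySem.Set.empty = pvDS l k) →
    (pvGoA f n m2e res).1 = (pvClosure (pvG l) f n res).1 ∧
    (pvGoA f n m2e res).2.2 = (pvClosure (pvG l) f n res).2 ∧
    (∀ k, (pvGoA f n m2e res).2.2.get? k = none →
      (pvGoA f n m2e res).2.1.getD k PySem.Set.empty = m2e.getD k PySem.Set.empty) ∧
    (∀ k v, res.get? k = some v → (pvGoA f n m2e res).2.2.get? k = some v) ∧
    (∀ k, res.get? k = none → (pvGoA f n m2e res).2.2.get? k ≠ none → pvReach l n k)

lemma pv_loop (l : List (String × String)) (hacyc : pvAcyc l) (f : Nat)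
    (ih : pvMain l f) (n : String) :
    ∀ (cs : List String) (s : PySem.Set String)
      (m2e res : PySem.Dict String (PySem.Set String)),
      (∀ c ∈ cs, pvEdge l n c) →
      res.get? n = none →
      m2e.getD n PySem.Set.empty = s →
      (∀ k, res.get? k = none → k ≠ n → pvReach l n k →
        m2e.getD k PySem.Set.empty = pvDS l k) →
      (cs.foldl (pvFA f n) (m2e, res)).2
          = (cs.foldl (pvFB (pvG l) f) (s, res)).2 ∧
      (cs.foldl (pvFA f n) (m2e, res)).1.getD n PySem.Set.empty
          = (cs.foldl (pvFB (pvG l) f) (s, res)).1 ∧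
      (cs.foldl (pvFA f n) (m2e, res)).2.get? n = none ∧
      (∀ k, (cs.foldl (pvFA f n) (m2e, res)).2.get? k = none → k ≠ n →
        (cs.foldl (pvFA f n) (m2e, res)).1.getD k PySem.Set.empty
          = m2e.getD k PySem.Set.empty) ∧
      (∀ k v, res.get? k = some v →
        (cs.foldl (pvFA f n) (m2e, res)).2.get? k = some v) ∧
      (∀ k, res.get? k = none → (cs.foldl (pvFA f n) (m2e, res)).2.get? k ≠ none →
        pvReach l n k ∧ k ≠ n) := by
  intro cs
  induction cs with
  | nil =>
    intro s m2e res _ hresn hsn _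
    exact ⟨rfl, hsn, hresn, fun _ _ _ => rfl, fun _ _ h => h, fun k h1 h2 => absurd h1 h2⟩
  | cons c cs' ihcs =>
    intro s m2e res hcs hresn hsn hclean
    have hedge : pvEdge l n c := hcs c (List.mem_cons_self ..)
    obtain ⟨hv, hres2, hpres, hmono, hnew⟩ := ih c m2e res (by
      intro k hk hreach
      by_cases hkn : k = n
      · exact absurd (hkn ▸ hreach) (hacyc n c hedge)
      · exact hclean k hk hkn (Relation.ReflTransGen.head hedge hreach))
    set r := pvGoA f c m2e res with hr
    set r2 := pvClosure (pvG l) f c res with hr2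
    have hres2n : r.2.2.get? n = none := by
      by_cases hx : r.2.2.get? n = none
      · exact hx
      · exact absurd (hnew n hresn hx) (hacyc n c hedge)
    have hstepA : pvFA f n (m2e, res) c
        = (if r.1 ≠ PySem.Set.empty then
            (r.2.1.modify n PySem.Set.empty (fun s => PySem.Set.update s r.1), r.2.2)
          else (r.2.1, r.2.2)) := rfl
    have hstepB : pvFB (pvG l) f (s, res) c = (PySem.Set.update s r2.1, r2.2) := rfl
    have hgetn : (pvFA f n (m2e, res) c).1.getD n PySem.Set.empty = PySem.Set.update s r.1 := by
      rw [hstepA]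
      by_cases hv0 : r.1 = PySem.Set.empty
      · rw [if_neg (by simp [hv0])]
        rw [hv0]
        have hupd : PySem.Set.update s PySem.Set.empty = s := rfl
        rw [hupd]
        exact (hpres n hres2n).trans hsn
      · rw [if_pos hv0, PySem.Dict.getD_modify_self]
        congr 1
        rw [hpres n hres2n, hsn]
    have hA2 : (pvFA f n (m2e, res) c).2 = r.2.2 := by
      rw [hstepA]; split <;> rfl
    have hA1k : ∀ k, k ≠ n →
        (pvFA f n (m2e, res) c).1.getD k PySem.Set.empty
          = r.2.1.getD k PySem.Set.empty := by
      intro k hk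
      rw [hstepA]
      split
      · exact PySem.Dict.getD_modify_of_ne _ PySem.Set.empty _ hk
      · rfl
    have hresmono : ∀ k, r.2.2.get? k = none → res.get? k = none := by
      intro k hk
      by_cases hx : res.get? k = none
      · exact hx
      · obtain ⟨v, hv'⟩ := Option.ne_none_iff_exists'.1 hx
        rw [hmono k v hv'] at hk
        simp at hk
    obtain ⟨c1, c2, c3, c4, c5, c6⟩ := ihcs (PySem.Set.update s r2.1)
      (pvFA f n (m2e, res) c).1 r.2.2
      (fun c' hc' => hcs c' (List.mem_cons_of_mem _ hc'))
      hres2n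
      (by rw [hgetn, hv])
      (by
        intro k hk hkn hreach
        rw [hA1k k hkn, hpres k hk]
        exact hclean k (hresmono k hk) hkn hreach)
    have hsplitA : (c :: cs').foldl (pvFA f n) (m2e, res)
        = cs'.foldl (pvFA f n) ((pvFA f n (m2e, res) c).1, r.2.2) := by
      rw [List.foldl_cons, ← hA2]
    have hsplitB : (c :: cs').foldl (pvFB (pvG l) f) (s, res)
        = cs'.foldl (pvFB (pvG l) f) (PySem.Set.update s r2.1, r.2.2) := by
      rw [List.foldl_cons, hstepB, ← hres2]
    rw [hsplitA, hsplitB]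
    refine ⟨c1, c2, c3, ?_, ?_, ?_⟩
    · intro k hk hkn
      rw [c4 k hk hkn, hA1k k hkn]
      exact hpres k (by
        by_cases hx : r.2.2.get? k = none
        · exact hx
        · obtain ⟨v, hv'⟩ := Option.ne_none_iff_exists'.1 hx
          rw [c5 k v hv'] at hk
          simp at hk)
    · intro k v hkv
      exact c5 k v (hmono k v hkv)
    · intro k hk hne
      by_cases hx : r.2.2.get? k = none
      · exact c6 k hx hne
      · refine ⟨Relation.ReflTransGen.head hedge (hnew k hk hx), ?_⟩
        intro hkn
        rw [hkn] at hx
        exact hx hres2n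

lemma pv_main (l : List (String × String)) (hacyc : pvAcyc l) : ∀ f, pvMain l f := by
  intro f
  induction f with
  | zero =>
    intro n m2e res _
    exact ⟨rfl, rfl, fun _ _ => rfl, fun _ _ h => h, fun k h1 h2 => absurd rfl (h1 ▸ h2)⟩
  | succ f ih =>
    intro n m2e res hclean
    cases hres : res.get? n with
    | some s =>
      rw [pvGoA_hit f n m2e res s hres, pvClosure_hit (pvG l) f n res s hres]
      exact ⟨rfl, rfl, fun _ _ => rfl, fun _ _ h => h, fun k h1 h2 => absurd rfl (h1 ▸ h2)⟩
    | none =>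
      have hme : m2e.getD n PySem.Set.empty = pvDS l n :=
        hclean n hres Relation.ReflTransGen.refl
      obtain ⟨c1, c2, c3, c4, c5, c6⟩ := pv_loop l hacyc f ih n
        (pvDirect (pvDict l).items n)
        (PySem.Set.ofList (pvDirect (pvDict l).items n)) m2e res
        (fun c hc => hc) hres (by rw [hme]; rfl)
        (fun k hk hkn hreach => hclean k hk hreach)
      rw [pvGoA_miss f n m2e res hres, pvClosure_miss (pvG l) f n res hres]
      simp only [pvG]
      rw [hme, pv_DS_eq]
      refine ⟨c2, by rw [c1, c2], ?_, ?_, ?_⟩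
      · intro k hk
        have hkn : k ≠ n := by
          intro h
          rw [h, PySem.Dict.get?_insert_self] at hk
          simp at hk
        rw [PySem.Dict.get?_insert_of_ne _ _ hkn] at hk
        exact c4 k hk hkn
      · intro k v hkv
        have hkn : k ≠ n := by
          intro h
          rw [h, hres] at hkv
          simp at hkv
        rw [PySem.Dict.get?_insert_of_ne _ _ hkn]
        exact c5 k v hkv
      · intro k hk hne
        by_cases hkn : k = n
        · subst hkn; exact Relation.ReflTransGen.refl
        · rw [PySem.Dict.get?_insert_of_ne _ _ hkn] at hne
          exact (c6 k hk hne).1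

lemma pv_outer (l : List (String × String)) (hacyc : pvAcyc l) (F : Nat) :
    ∀ (ks : List String) (m2e res : PySem.Dict String (PySem.Set String)),
      (∀ k, res.get? k = none → m2e.getD k PySem.Set.empty = pvDS l k) →
      (ks.foldl (fun st k => ((pvGoA F k st.1 st.2).2.1, (pvGoA F k st.1 st.2).2.2))
        (m2e, res)).2
      = ks.foldl (fun res k => (pvClosure (pvG l) F k res).2) res := by
  intro ks
  induction ks with
  | nil => intro m2e res _; rfl
  | cons k0 rest ihp =>
    intro m2e res hclean
    obtain ⟨_, hres2, hpres, hmono, _⟩ :=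
      pv_main l hacyc F k0 m2e res (fun k hk _ => hclean k hk)
    rw [List.foldl_cons, List.foldl_cons, ihp _ _ ?_, hres2]
    intro k hk
    have hreskn : res.get? k = none := by
      by_cases hx : res.get? k = none
      · exact hx
      · obtain ⟨v, hv'⟩ := Option.ne_none_iff_exists'.1 hx
        rw [hmono k v hv'] at hk
        simp at hk
    rw [hpres k hk]
    exact hclean k hreskn

-- ===== B-side: the stack machine simulates the pure recursion =====

-- facts about the pure recursion: the computed value is stored under its node,
-- stored entries never change, and new entries are reachable from the call's node
lemma pvClosure_self_get (g : String → List String) (f : Nat) (n : String)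
    (res : PySem.Dict String (PySem.Set String)) (hf : 0 < f) :
    (pvClosure g f n res).2.get? n = some (pvClosure g f n res).1 := by
  cases f with
  | zero => omega
  | succ f =>
    cases hres : res.get? n with
    | some s => rw [pvClosure_hit g f n res s hres]; exact hres
    | none =>
      rw [pvClosure_miss g f n res hres]
      exact PySem.Dict.get?_insert_self ..

lemma pvClosure_mono (g : String → List String) :
    ∀ f n res k v, res.get? k = some v → (pvClosure g f n res).2.get? k = some v := by
  intro f
  induction f with
  | zero => intro n res k v h; exact h
  | succ f ih =>
    intro n res k v h
    cases hres : res.get? n with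
    | some s => rw [pvClosure_hit g f n res s hres]; exact h
    | none =>
      rw [pvClosure_miss g f n res hres]
      have hkn : k ≠ n := by
        intro he; rw [he, hres] at h; cases h
      rw [PySem.Dict.get?_insert_of_ne _ _ hkn]
      have haux : ∀ (cs : List String) (s : PySem.Set String) res,
          res.get? k = some v → ((cs.foldl (pvFB g f) (s, res)).2).get? k = some v := by
        intro cs
        induction cs with
        | nil => intro s res h; exact h
        | cons c cs' ihc =>
          intro s res h
          rw [List.foldl_cons]
          exact ihc _ _ (ih c res k v h)
      exact haux _ _ _ h

lemma pvClosure_new_reach (l : List (String × String)) :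
    ∀ f n res k, res.get? k = none → ((pvClosure (pvG l) f n res).2).get? k ≠ none →
      pvReach l n k := by
  intro f
  induction f with
  | zero => intro n res k h hne; exact absurd h hne
  | succ f ih =>
    intro n res k h hne
    cases hres : res.get? n with
    | some s => rw [pvClosure_hit (pvG l) f n res s hres] at hne; exact absurd h hne
    | none =>
      rw [pvClosure_miss (pvG l) f n res hres] at hne
      by_cases hkn : k = n
      · subst hkn; exact Relation.ReflTransGen.refl
      · rw [PySem.Dict.get?_insert_of_ne _ _ hkn] at hne
        have haux : ∀ (cs : List String) (s : PySem.Set String) res,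
            (∀ c ∈ cs, pvEdge l n c) → res.get? k = none →
            ((cs.foldl (pvFB (pvG l) f) (s, res)).2).get? k ≠ none → pvReach l n k := by
          intro cs
          induction cs with
          | nil => intro s res _ h hne; exact absurd h hne
          | cons c cs' ihc =>
            intro s res hcs h hne
            rw [List.foldl_cons] at hne
            cases hx : (pvClosure (pvG l) f c res).2.get? k with
            | none => exact ihc _ _ (fun c' hc' => hcs c' (List.mem_cons_of_mem _ hc')) hx hne
            | some v =>
              exact Relation.ReflTransGen.head (hcs c (List.mem_cons_self ..))
                (ih c res k h (by rw [hx]; simp))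
        exact haux _ _ _ (fun c hc => hc) h hne

-- auxiliary: the memo part of the closure fold, and the assembled set read back by lookups
def pvR (l : List (String × String)) (d : Nat) (cs : List String)
    (res : PySem.Dict String (PySem.Set String)) : PySem.Dict String (PySem.Set String) :=
  cs.foldl (fun r c => (pvClosure (pvG l) d c r).2) res

lemma pv_foldFB_snd (l : List (String × String)) (d : Nat) :
    ∀ (cs : List String) (s : PySem.Set String) res,
      (cs.foldl (pvFB (pvG l) d) (s, res)).2 = pvR l d cs res := by
  intro cs
  induction cs with
  | nil => intro s res; rfl
  | cons c cs' ihc => intro s res; rw [List.foldl_cons]; exact ihc _ _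

lemma pv_R_mono (l : List (String × String)) (d : Nat) :
    ∀ (cs : List String) res k v, res.get? k = some v → (pvR l d cs res).get? k = some v := by
  intro cs
  induction cs with
  | nil => intro res k v h; exact h
  | cons c cs' ihc =>
    intro res k v h
    exact ihc _ k v (pvClosure_mono (pvG l) d c res k v h)

lemma pv_fold_val (l : List (String × String)) (d : Nat) :
    ∀ (cs : List String) (s₀ : PySem.Set String) res₀,
      (∀ c ∈ cs, pvDB l d c) →
      (cs.foldl (pvFB (pvG l) d) (s₀, res₀)).1
        = cs.foldl (fun t c => PySem.Set.update t ((pvR l d cs res₀).getD c PySem.Set.empty)) s₀ := by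
  intro cs
  induction cs with
  | nil => intro s₀ res₀ _; rfl
  | cons c cs' ihc =>
    intro s₀ res₀ hdb
    have hd : 0 < d := by
      cases d with
      | zero => exact absurd (hdb c (List.mem_cons_self ..)) (by simp [pvDB])
      | succ d => omega
    set r := pvClosure (pvG l) d c res₀ with hr
    have hstored : (pvR l d cs' r.2).get? c = some r.1 :=
      pv_R_mono l d cs' r.2 c r.1 (pvClosure_self_get (pvG l) d c res₀ hd)
    have hRc : pvR l d (c :: cs') res₀ = pvR l d cs' r.2 := by
      simp only [pvR, List.foldl_cons, hr]
    rw [List.foldl_cons, List.foldl_cons]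
    have h1 : pvFB (pvG l) d (s₀, res₀) c = (PySem.Set.update s₀ r.1, r.2) := rfl
    rw [h1, ihc _ _ (fun c' hc' => hdb c' (List.mem_cons_of_mem _ hc'))]
    rw [hRc]
    congr 1
    rw [PySem.Dict.getD_eq_get?_getD, hstored]
    rfl

-- the stack-machine simulation statement, parameterised by the depth budget
def pvNodeSim (l : List (String × String)) (d : Nat) : Prop :=
  ∀ n, pvDB l d n → ∀ res (st : List (String × Nat)), res.get? n = none →
    ∃ k ≤ pvCost (pvDict l).items.length d,
      (pvStep1 (pvBuildB (pvDict l)))^[k] ((n, 0) :: st, res)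
        = (st, (pvClosure (pvG l) d n res).2)

lemma pv_frames (l : List (String × String)) (hacyc : pvAcyc l) (d : Nat)
    (ih : pvNodeSim l d) (n : String) (hkd : ∀ c ∈ pvG l n, pvDB l d c) :
    ∀ (cs : List String) (i : Nat) res (st : List (String × Nat)),
      (pvG l n).drop i = cs → res.get? n = none →
      ∃ k ≤ cs.length + 1 + cs.length * pvCost (pvDict l).items.length d,
        (pvStep1 (pvBuildB (pvDict l)))^[k] ((n, i) :: st, res)
          = (st, (pvR l d cs res).insert n
              ((pvG l n).foldl
                (fun t c => PySem.Set.update t ((pvR l d cs res).getD c PySem.Set.empty))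
                (PySem.Set.ofList (pvG l n)))) := by
  intro cs
  induction cs with
  | nil =>
    intro i res st hdrop hresn
    refine ⟨1, by omega, ?_⟩
    have hle : (pvG l n).length ≤ i := by
      by_contra hlt
      push_neg at hlt
      have := congrArg List.length hdrop
      simp [List.length_drop] at this
      omega
    simp only [Function.iterate_one, pvStep1, pv_buildB_getD l n]
    rw [if_neg (by omega)]
    rfl
  | cons c cs' ihc =>
    intro i res st hdrop hresn
    have hmemc : c ∈ pvG l n := by
      have : c ∈ (pvG l n).drop i := by rw [hdrop]; exact List.mem_cons_self ..
      exact List.mem_of_mem_drop this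
    have hlt : i < (pvG l n).length := by
      by_contra hge
      push_neg at hge
      rw [List.drop_eq_nil_of_le hge] at hdrop
      cases hdrop
    have hgeti : (pvG l n).getD i "" = c := by
      have h0 : (pvG l n)[i]? = some c := by
        have h1 : ((pvG l n).drop i)[0]? = some c := by rw [hdrop]; rfl
        rwa [List.getElem?_drop, Nat.add_zero] at h1
      simp [List.getD, h0]
    have hdrop' : (pvG l n).drop (i + 1) = cs' := by
      have : (pvG l n).drop (i + 1) = ((pvG l n).drop i).drop 1 := by
        rw [List.drop_drop]
      rw [this, hdrop]
      rfl
    have hdbc : pvDB l d c := hkd c hmemc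
    have hstep : pvStep1 (pvBuildB (pvDict l)) ((n, i) :: st, res)
        = (match res.get? c with
           | none => ((c, 0) :: (n, i + 1) :: st, res)
           | some _ => ((n, i + 1) :: st, res)) := by
      simp only [pvStep1, pv_buildB_getD l n]
      rw [if_pos hlt, hgeti]
    set C := pvCost (pvDict l).items.length d with hC
    cases hresc : res.get? c with
    | some s =>
      have hd : 0 < d := by
        cases d with
        | zero => exact absurd hdbc (by simp [pvDB])
        | succ d => omega
      obtain ⟨d', rfl⟩ : ∃ d', d = d' + 1 := ⟨d - 1, by omega⟩
      have hRc : pvR l (d' + 1) (c :: cs') res = pvR l (d' + 1) cs' res := by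
        simp only [pvR, List.foldl_cons]
        rw [pvClosure_hit (pvG l) d' c res s hresc]
      obtain ⟨k', hk', hrun⟩ := ihc (i + 1) res st hdrop' hresn
      refine ⟨k' + 1, ?_, ?_⟩
      · have hmul : (cs'.length + 1) * C = cs'.length * C + C := by ring
        simp only [List.length_cons, hmul]
        omega
      · rw [Function.iterate_add_apply _ k' 1, Function.iterate_one, hstep, hresc]
        rw [hrun, hRc]
    | none =>
      obtain ⟨kc, hkc, hrunc⟩ := ih c hdbc res ((n, i + 1) :: st) hresc
      set res' := (pvClosure (pvG l) d c res).2 with hres'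
      have hresn' : res'.get? n = none := by
        by_cases hx : res'.get? n = none
        · exact hx
        · exact absurd (pvClosure_new_reach l d c res n hresn hx) (hacyc n c hmemc)
      have hRc : pvR l d (c :: cs') res = pvR l d cs' res' := by
        simp only [pvR, List.foldl_cons, hres']
      obtain ⟨k', hk', hrun⟩ := ihc (i + 1) res' st hdrop' hresn'
      refine ⟨k' + (kc + 1), ?_, ?_⟩
      · have hmul : (cs'.length + 1) * C = cs'.length * C + C := by ring
        simp only [List.length_cons, hmul]
        omega
      · rw [Function.iterate_add_apply _ k' (kc + 1),
          Function.iterate_add_apply _ kc 1, Function.iterate_one, hstep, hresc]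
        rw [hrunc, hrun, hRc]

lemma pv_G_len_le (l : List (String × String)) (n : String) :
    (pvG l n).length ≤ (pvDict l).items.length := by
  unfold pvG pvDirect
  rw [List.length_map]
  exact List.length_filter_le _ _

lemma pv_node (l : List (String × String)) (hacyc : pvAcyc l) :
    ∀ d, pvNodeSim l d := by
  intro d
  induction d with
  | zero => intro n hdb; exact absurd hdb (by simp [pvDB])
  | succ d ih =>
    intro n hdb res st hresn
    have hkd : ∀ c ∈ pvG l n, pvDB l d c := hdb
    obtain ⟨k, hk, hrun⟩ := pv_frames l hacyc d ih n hkd (pvG l n) 0 res st (by simp) hresn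
    refine ⟨k, ?_, ?_⟩
    · set L := (pvDict l).items.length with hL
      set C := pvCost L d with hC
      have hKL : (pvG l n).length ≤ L := pv_G_len_le l n
      have : (pvG l n).length * C ≤ L * C := Nat.mul_le_mul_right C hKL
      have hcost : pvCost L (d + 1) = (L + 1) + L * C := rfl
      omega
    · rw [hrun]
      rw [pvClosure_miss (pvG l) d n res hresn]
      rw [pv_foldFB_snd l d (pvG l n) (PySem.Set.ofList (pvG l n)) res]
      rw [pv_fold_val l d (pvG l n) (PySem.Set.ofList (pvG l n)) res hkd]

lemma pv_fix (l : List (String × String)) (j : Nat)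
    (res : PySem.Dict String (PySem.Set String)) :
    (pvStep1 (pvBuildB (pvDict l)))^[j] (([] : List (String × Nat)), res) = ([], res) :=
  Function.iterate_fixed rfl j

lemma pv_outerB (l : List (String × String)) (hacyc : pvAcyc l)
    (hdb : ∀ n, pvDB l (l.length + 1) n) :
    ∀ (ks : List String) (res : PySem.Dict String (PySem.Set String)),
      ks.foldl (fun result key =>
          match result.get? key with
          | some _ => result
          | none => pvStackRun (pvBuildB (pvDict l)) (pvFuel l) ([(key, 0)], result)) res
        = ks.foldl (fun r k => (pvClosure (pvG l) (l.length + 1) k r).2) res := by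
  intro ks
  induction ks with
  | nil => intro res; rfl
  | cons k0 rest ihp =>
    intro res
    rw [List.foldl_cons, List.foldl_cons]
    cases hres : res.get? k0 with
    | some s =>
      rw [pvClosure_hit (pvG l) l.length k0 res s hres]
      exact ihp res
    | none =>
      obtain ⟨k, hk, hrun⟩ := pv_node l hacyc (l.length + 1) k0 (hdb k0) res [] hres
      have hF : pvFuel l = pvCost (pvDict l).items.length (l.length + 1) := rfl
      have hstack : pvStackRun (pvBuildB (pvDict l)) (pvFuel l) ([(k0, 0)], res)
          = (pvClosure (pvG l) (l.length + 1) k0 res).2 := by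
        unfold pvStackRun
        rw [hF, (by omega : pvCost (pvDict l).items.length (l.length + 1)
            = (pvCost (pvDict l).items.length (l.length + 1) - k) + k),
          Function.iterate_add_apply, hrun, pv_fix]
      rw [hstack]
      exact ihp _

theorem pv_equiv (l : List (String × String)) (hpre : Pre_find_employees l) :
    find_employees l = find_employees_alt l := by
  have hacyc := pv_pre_acyc l hpre
  have hdb := pv_pre_dB l hpre
  unfold find_employees find_employees_alt
  dsimp only
  rw [pv_outer l hacyc (l.length + 1) (pvDict l).keys (pvBuild (pvDict l)) PySem.Dict.empty
    (fun k _ => pv_build_getD l k)]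
  exact congrArg PySem.Dict.items (pv_outerB l hacyc hdb (pvDict l).keys PySem.Dict.empty).symm

-- ===== VERDICT (by name: the statement is the Claim_ definition above) =====
theorem find_employees_spec : Claim_equal_find_employees := by
  intro l _ hpre
  unfold Spec_find_employees
  exact pv_equiv l hpre
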